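-- pv_equiv track=rewrite | github.com/Kinshua/Siren | core/cortex/adversarial_ml.py | _compute_max_run_length
-- ===== SOURCE A (Python) =====
-- def _compute_max_run_length(text: str) -> int:
--     """Compute maximum run length of the same character."""
--     if not text:
--         return 0
--     max_run = 1
--     current_run = 1
--     for i in range(1, len(text)):
--         if text[i] == text[i - 1]:
--             current_run += 1
--             max_run = max(max_run, current_run)
--         else:
--             current_run = 1
--     return max_run
-- ===== SOURCE B (Python) =====
-- def _compute_max_run_length(text: str) -> int:
--     """Compute maximum run length of the same character (run-scanning two-pointer)."""
--     best = 0
--     i = 0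
--     n = len(text)
--     while i < n:
--         j = i
--         while j < n and text[j] == text[i]:
--             j += 1
--         best = max(best, j - i)
--         i = j
--     return best
-- ===== Notes on version B (the rewrite author's own statement) =====
-- stated objective: alternative
-- what changed: Replaces the running-counter loop over adjacent character pairs with a two-pointer scan that advances over each maximal run at once and maximises run lengths (empty string naturally gives 0, no special guard).
import Mathlib
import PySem

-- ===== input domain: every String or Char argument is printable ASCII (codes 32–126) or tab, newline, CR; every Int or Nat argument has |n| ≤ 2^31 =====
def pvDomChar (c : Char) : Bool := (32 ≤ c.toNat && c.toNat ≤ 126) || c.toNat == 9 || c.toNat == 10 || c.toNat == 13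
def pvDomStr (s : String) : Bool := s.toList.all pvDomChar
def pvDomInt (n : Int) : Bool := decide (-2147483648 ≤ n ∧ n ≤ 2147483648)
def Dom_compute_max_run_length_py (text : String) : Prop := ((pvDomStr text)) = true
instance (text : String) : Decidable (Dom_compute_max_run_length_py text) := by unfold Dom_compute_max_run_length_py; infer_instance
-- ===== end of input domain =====

-- B replaces A's running-counter loop with a two-pointer scan over maximal runs (alternative decomposition, same cost).
-- ===== PORT A =====
-- Python's for-loop over i in range(1, len(text)) comparing text[i] to text[i-1] is ported as the
-- obvious structural recursion carrying the previous character and the same (max_run, current_run) state.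
def aLoop : Char → Int → Int → List Char → Int
  | _, maxr, _, [] => maxr
  | prev, maxr, cur, c :: rest =>
    if c == prev then aLoop c (max maxr (cur + 1)) (cur + 1) rest
    else aLoop c maxr 1 rest

def compute_max_run_length_py (text : String) : Int :=
  match text.toList with
  | [] => 0
  | c :: rest => aLoop c 1 1 rest

-- ===== PORT B =====
-- Source B's outer while-loop: each iteration consumes one maximal run (inner while = takeWhile/dropWhile)
-- and maximises best against the run length.
def bLoop (l : List Char) (best : Int) : Int :=
  match l with
  | [] => best
  | c :: rest =>
    bLoop (rest.dropWhile (· == c)) (max best (1 + ((rest.takeWhile (· == c)).length : Int)))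
termination_by l.length
decreasing_by
  simp only [List.length_cons]
  exact Nat.lt_succ_of_le (List.length_dropWhile_le _ _)

def compute_max_run_length_py_alt (text : String) : Int :=
  bLoop text.toList 0

-- ===== PRECONDITION & SPEC =====
def Spec_compute_max_run_length_py (text : String) (out : Int) : Prop := out = compute_max_run_length_py_alt text
instance (text : String) (out : Int) : Decidable (Spec_compute_max_run_length_py text out) := by unfold Spec_compute_max_run_length_py; infer_instance

-- ===== CLAIM (what is proved, stated in full; the proofs are below) =====
def Claim_equal_compute_max_run_length_py : Prop := ∀ (text : String), Dom_compute_max_run_length_py text → Spec_compute_max_run_length_py text (compute_max_run_length_py text)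

-- ===== LEMMAS AND PROOFS =====

theorem bLoop_shift (l : List Char) (best : Int) (h : 0 ≤ best) :
    bLoop l best = max best (bLoop l 0) := by
  match l with
  | [] => simp [bLoop, h]
  | c :: rest =>
    have t0 : (0:Int) ≤ 1 + ((rest.takeWhile (· == c)).length : Int) := by positivity
    rw [bLoop, bLoop,
        bLoop_shift (rest.dropWhile (· == c)) (max best (1 + ((rest.takeWhile (· == c)).length : Int))) (le_max_of_le_right t0),
        bLoop_shift (rest.dropWhile (· == c)) (max 0 (1 + ((rest.takeWhile (· == c)).length : Int))) (le_max_of_le_right t0)]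
    omega
termination_by l.length
decreasing_by
  all_goals simp only [List.length_cons]
  all_goals exact Nat.lt_succ_of_le (List.length_dropWhile_le _ _)

theorem aLoop_eq (l : List Char) (c : Char) (maxr cur : Int) (h1 : 1 ≤ cur) (h2 : cur ≤ maxr) :
    aLoop c maxr cur l =
      max (max maxr (cur + ((l.takeWhile (· == c)).length : Int)))
          (bLoop (l.dropWhile (· == c)) 0) := by
  match l with
  | [] => simp [aLoop, bLoop]; omega
  | d :: rest =>
    by_cases hd : d = c
    · subst hd
      rw [aLoop]
      simp only [List.takeWhile_cons, List.dropWhile_cons, beq_self_eq_true, if_true]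
      rw [aLoop_eq rest d (max maxr (cur + 1)) (cur + 1) (by omega) (le_max_right _ _)]
      simp only [List.length_cons]
      push_cast
      omega
    · have hb : (d == c) = false := by simp [hd]
      rw [aLoop]
      simp only [List.takeWhile_cons, List.dropWhile_cons, hb, Bool.false_eq_true, if_false]
      rw [aLoop_eq rest d maxr 1 le_rfl (by omega)]
      conv_rhs => rw [bLoop]
      rw [bLoop_shift _ _ (le_max_of_le_right (by positivity))]
      simp only [List.length_nil]
      omega
termination_by l.length
decreasing_by
  all_goals simp only [List.length_cons]
  all_goals first
    | exact Nat.lt_succ_of_le (List.length_dropWhile_le _ _)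
    | exact Nat.lt_succ_self _

-- ===== VERDICT =====
theorem compute_max_run_length_py_spec : Claim_equal_compute_max_run_length_py := by
  intro text _
  unfold Spec_compute_max_run_length_py compute_max_run_length_py compute_max_run_length_py_alt
  cases h : text.toList with
  | nil =>
    show (0:Int) = bLoop [] 0
    rw [bLoop]
  | cons c rest =>
    show aLoop c 1 1 rest = bLoop (c :: rest) 0
    rw [aLoop_eq rest c 1 1 le_rfl le_rfl, bLoop,
        bLoop_shift _ _ (le_max_of_le_right (by positivity))]
    have : (0:Int) ≤ ((rest.takeWhile (· == c)).length : Int) := by positivity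
    omega
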